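-- pv_equiv track=rewrite | github.com/S-SIRIUS/Programmers | 프로그래머스/2/42584. 주식가격/주식가격.py | solution
-- ===== SOURCE A (Python) =====
-- from collections import deque
--
-- def solution(prices):
--     answer = []
--
--     prices_queue=deque()
--     for price in prices:
--         prices_queue.append(price)
--
--     time=0
--     while prices_queue:
--         standard=prices_queue[0]
--         prices_queue.popleft()
--
--         for price in prices_queue:
--             if(standard <= price):
--                 time+=1
--             else:
--                 time+=1
--                 break
--
--         answer.append(time)
--         time=0
--
--     return answer
-- ===== SOURCE B (Python) =====
-- def solution(prices):
--     n = len(prices)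
--     answer = [0] * n
--     stack = []
--     for i in range(n):
--         p = prices[i]
--         while stack and prices[stack[-1]] > p:
--             j = stack.pop()
--             answer[j] = i - j
--         stack.append(i)
--     while stack:
--         j = stack.pop()
--         answer[j] = n - 1 - j
--     return answer
-- ===== Notes on version B (the rewrite author's own statement) =====
-- stated objective: faster
-- what changed: Replaced A's per-element rescan of the remaining queue with a single left-to-right pass over a monotonic stack of unresolved indices, resolving each index's duration once when a strictly smaller price arrives (leftovers get n-1-i).
import Mathlib
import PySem

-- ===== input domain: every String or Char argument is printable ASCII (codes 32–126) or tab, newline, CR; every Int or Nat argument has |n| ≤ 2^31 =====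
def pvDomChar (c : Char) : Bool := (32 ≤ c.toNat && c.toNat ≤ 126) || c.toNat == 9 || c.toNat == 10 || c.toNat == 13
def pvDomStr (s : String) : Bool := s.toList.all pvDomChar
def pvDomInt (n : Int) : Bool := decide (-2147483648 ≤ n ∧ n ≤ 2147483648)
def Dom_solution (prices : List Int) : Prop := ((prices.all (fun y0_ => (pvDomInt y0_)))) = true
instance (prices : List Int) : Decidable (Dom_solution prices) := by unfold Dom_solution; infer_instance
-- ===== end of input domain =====

-- B replaces A's quadratic rescans with a monotonic index stack that resolves each
-- element's waiting time once, when a strictly smaller price arrives (objective: faster).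

-- ===== PORT A =====
-- inner 'for price in prices_queue' loop with the running 'time' accumulator
def innerA (standard : Int) : List Int → Int → Int
  | [], t => t
  | p :: ps, t => if standard ≤ p then innerA standard ps (t + 1) else t + 1

-- outer 'while prices_queue' loop (popleft = take the head)
def whileA : List Int → List Int
  | [] => []
  | s :: rest => innerA s rest 0 :: whileA rest

def solution (prices : List Int) : List Int :=
  let q := prices.foldl (fun acc p => acc ++ [p]) []   -- building the deque
  whileA q

-- ===== PORT B =====
-- 'while stack and prices[stack[-1]] > p: j = stack.pop(); answer[j] = i - j'
def popDrop (prices : List Int) (p : Int) (i : Nat) : List Nat → List Int → List Nat × List Int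
  | [], ans => ([], ans)
  | j :: st, ans =>
      if prices.getD j 0 > p then popDrop prices p i st (ans.set j ((i : Int) - (j : Int)))
      else (j :: st, ans)

-- 'for i in range(n)': m counts the remaining iterations, i is the current index
def mainLoopB (prices : List Int) : Nat → Nat → List Nat → List Int → List Nat × List Int
  | 0, _, st, ans => (st, ans)
  | m + 1, i, st, ans =>
      let r := popDrop prices (prices.getD i 0) i st ans
      mainLoopB prices m (i + 1) (i :: r.1) r.2

-- trailing 'while stack: j = stack.pop(); answer[j] = n - 1 - j'
def finLoopB (n : Nat) : List Nat → List Int → List Int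
  | [], ans => ans
  | j :: st, ans => finLoopB n st (ans.set j ((n : Int) - 1 - (j : Int)))

def solution_alt (prices : List Int) : List Int :=
  let n := prices.length
  let r := mainLoopB prices n 0 [] (List.replicate n 0)
  finLoopB n r.1 r.2

-- ===== PRECONDITION & SPEC =====
def Spec_solution (prices : List Int) (out : List Int) : Prop := out = solution_alt prices
instance (prices : List Int) (out : List Int) : Decidable (Spec_solution prices out) := by unfold Spec_solution; infer_instance

-- ===== CLAIM (what is proved, stated in full; the proofs are below) =====
def Claim_equal_solution : Prop := ∀ (prices : List Int), Dom_solution prices → Spec_solution prices (solution prices)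

-- ===== LEMMAS AND PROOFS =====

-- the common specification value: seconds until the price strictly drops, scanning l
def durTail (p : Int) : List Int → Int
  | [] => 0
  | q :: qs => if p ≤ q then 1 + durTail p qs else 1

theorem innerA_eq (s : Int) (l : List Int) (t : Int) : innerA s l t = t + durTail s l := by
  induction l generalizing t with
  | nil => simp [innerA, durTail]
  | cons q qs ih =>
      simp only [innerA, durTail]
      split_ifs with h
      · rw [ih]; ring
      · ring

theorem foldl_append_id (l acc : List Int) :
    l.foldl (fun acc p => acc ++ [p]) acc = acc ++ l := by
  induction l generalizing acc with
  | nil => simp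
  | cons p ps ih => simp [List.foldl, ih]

theorem solution_eq_whileA (prices : List Int) : solution prices = whileA prices := by
  show whileA (prices.foldl (fun acc p => acc ++ [p]) []) = whileA prices
  rw [foldl_append_id, List.nil_append]

theorem whileA_length (l : List Int) : (whileA l).length = l.length := by
  induction l with
  | nil => rfl
  | cons s rest ih => simp [whileA, ih]

theorem whileA_getD (P : List Int) (j : Nat) (hj : j < P.length) :
    (whileA P).getD j 0 = durTail (P.getD j 0) (P.drop (j + 1)) := by
  induction P generalizing j with
  | nil => simp at hj
  | cons s rest ih =>
      cases j with
      | zero => simp [whileA, innerA_eq]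
      | succ j =>
          simp only [whileA, List.getD_cons_succ, List.drop_succ_cons]
          exact ih j (by simpa using hj)

theorem getD_drop (P : List Int) (a k : Nat) (h : a + k < P.length) :
    (P.drop a).getD k 0 = P.getD (a + k) 0 := by
  rw [List.getD_eq_getElem _ _ (by simp; omega), List.getD_eq_getElem _ _ h]
  simp [List.getElem_drop]

theorem durTail_all (p : Int) (l : List Int)
    (h : ∀ k, k < l.length → p ≤ l.getD k 0) : durTail p l = l.length := by
  induction l with
  | nil => simp [durTail]
  | cons q qs ih =>
      have h0 : p ≤ q := by simpa using h 0 (by simp)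
      simp only [durTail, if_pos h0]
      rw [ih (fun k hk => by simpa using h (k + 1) (by simpa using hk))]
      simp; ring

theorem durTail_first (p : Int) (l : List Int) (m : Nat) (hm : m < l.length)
    (hb : ∀ k, k < m → p ≤ l.getD k 0) (hd : l.getD m 0 < p) :
    durTail p l = (m : Int) + 1 := by
  induction l generalizing m with
  | nil => simp at hm
  | cons q qs ih =>
      cases m with
      | zero =>
          simp only [List.getD_cons_zero] at hd
          simp [durTail, not_le.mpr hd]
      | succ m =>
          have h0 : p ≤ q := by simpa using hb 0 (Nat.succ_pos m)
          simp only [durTail, if_pos h0]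
          rw [ih m (by simpa using hm) (fun k hk => by simpa using hb (k + 1) (by omega))
              (by simpa using hd)]
          push_cast; ring

-- the loop invariant of B's main loop over prices P (n = P.length)
def BInv (P : List Int) (i : Nat) (st : List Nat) (ans : List Int) : Prop :=
  ans.length = P.length ∧
  st.Pairwise (fun a b => P.getD b 0 ≤ P.getD a 0) ∧
  (∀ j ∈ st, j < i ∧ ∀ k, j < k → k < i → P.getD j 0 ≤ P.getD k 0) ∧
  (∀ j, j < i → (∀ k, j < k → k < i → P.getD j 0 ≤ P.getD k 0) → j ∈ st) ∧
  (∀ j, j < i → j ∉ st → ans.getD j 0 = durTail (P.getD j 0) (P.drop (j + 1)))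

-- mid-pop invariant: membership is only guaranteed for indices also undominated by P[i]
def BMInv (P : List Int) (i : Nat) (st : List Nat) (ans : List Int) : Prop :=
  ans.length = P.length ∧
  st.Pairwise (fun a b => P.getD b 0 ≤ P.getD a 0) ∧
  (∀ j ∈ st, j < i ∧ ∀ k, j < k → k < i → P.getD j 0 ≤ P.getD k 0) ∧
  (∀ j, j < i → (∀ k, j < k → k < i + 1 → P.getD j 0 ≤ P.getD k 0) → j ∈ st) ∧
  (∀ j, j < i → j ∉ st → ans.getD j 0 = durTail (P.getD j 0) (P.drop (j + 1)))

theorem BInv_toM (P : List Int) (i : Nat) (st : List Nat) (ans : List Int)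
    (h : BInv P i st ans) : BMInv P i st ans := by
  obtain ⟨h1, h2, h3, h4, h5⟩ := h
  exact ⟨h1, h2, h3, fun j hj hall => h4 j hj (fun k hk1 hk2 => hall k hk1 (by omega)), h5⟩

theorem popDrop_spec (P : List Int) (i : Nat) (hi : i < P.length) :
    ∀ (st : List Nat) (ans : List Int), BMInv P i st ans →
      BMInv P i (popDrop P (P.getD i 0) i st ans).1 (popDrop P (P.getD i 0) i st ans).2 ∧
      ∀ j ∈ (popDrop P (P.getD i 0) i st ans).1, P.getD j 0 ≤ P.getD i 0 := by
  intro st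
  induction st with
  | nil => intro ans h; exact ⟨h, by simp [popDrop]⟩
  | cons j st₂ ih =>
      intro ans h
      obtain ⟨h1, h2, h3, h4, h5⟩ := h
      by_cases hgt : P.getD j 0 > P.getD i 0
      · -- pop j, set ans[j] := i - j
        have hji : j < i := (h3 j (by simp)).1
        have step : BMInv P i st₂ (ans.set j ((i : Int) - (j : Int))) := by
          refine ⟨by simp [h1], h2.of_cons, fun j' hj' => h3 j' (by simp [hj']),
            ?_, ?_⟩
          · intro j' hj' hall
            have := h4 j' hj' hall
            rcases List.mem_cons.mp this with rfl | hmem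
            · exact absurd (hall i hji (by omega)) (by omega)
            · exact hmem
          · intro j' hj' hnot
            by_cases hjj : j' = j
            · subst hjj
              have hlen : j' < ans.length := by omega
              rw [List.getD_eq_getElem _ _ (by simpa using hlen), List.getElem_set_self]
              have hnd : ∀ k, j' < k → k < i → P.getD j' 0 ≤ P.getD k 0 :=
                (h3 j' (by simp)).2
              have hm : i - 1 - j' < (P.drop (j' + 1)).length := by simp; omega
              rw [durTail_first (P.getD j' 0) (P.drop (j' + 1)) (i - 1 - j') hm
                  (fun k hk => by
                    rw [getD_drop P (j' + 1) k (by simp at hm; omega)]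
                    exact hnd (j' + 1 + k) (by omega) (by omega))
                  (by
                    rw [getD_drop P (j' + 1) (i - 1 - j') (by omega)]
                    have : j' + 1 + (i - 1 - j') = i := by omega
                    rw [this]; omega)]
              omega
            · have hnot' : j' ∉ j :: st₂ := by
                simp only [List.mem_cons, not_or]; exact ⟨hjj, hnot⟩
              rw [List.getD_eq_getElem _ _ (by simp; omega),
                  List.getElem_set_ne (by omega), ← List.getD_eq_getElem _ _ (by omega)]
              exact h5 j' hj' hnot'
        have heq : popDrop P (P.getD i 0) i (j :: st₂) ans
            = popDrop P (P.getD i 0) i st₂ (ans.set j ((i : Int) - (j : Int))) := by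
          simp only [popDrop]; rw [if_pos hgt]
        rw [heq]; exact ih _ step
      · -- stop: head price ≤ p, and by Pairwise so is everything below it
        have hstop : ∀ j' ∈ j :: st₂, P.getD j' 0 ≤ P.getD i 0 := by
          intro j' hj'
          rcases List.mem_cons.mp hj' with rfl | hmem
          · omega
          · exact le_trans (List.rel_of_pairwise_cons h2 hmem) (by omega)
        have heq : popDrop P (P.getD i 0) i (j :: st₂) ans = (j :: st₂, ans) := by
          simp only [popDrop]; rw [if_neg hgt]
        rw [heq]
        exact ⟨⟨h1, h2, h3, h4, h5⟩, hstop⟩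

theorem push_spec (P : List Int) (i : Nat) (hi : i < P.length)
    (st : List Nat) (ans : List Int) (h : BMInv P i st ans)
    (hle : ∀ j ∈ st, P.getD j 0 ≤ P.getD i 0) : BInv P (i + 1) (i :: st) ans := by
  obtain ⟨h1, h2, h3, h4, h5⟩ := h
  refine ⟨h1, ?_, ?_, ?_, ?_⟩
  · exact List.pairwise_cons.mpr ⟨hle, h2⟩
  · intro j hj
    rcases List.mem_cons.mp hj with rfl | hmem
    · exact ⟨by omega, fun k hk1 hk2 => by omega⟩
    · obtain ⟨hlt, hnd⟩ := h3 j hmem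
      refine ⟨by omega, fun k hk1 hk2 => ?_⟩
      by_cases hki : k = i
      · subst hki; exact hle j hmem
      · exact hnd k hk1 (by omega)
  · intro j hj hall
    by_cases hji : j = i
    · simp [hji]
    · exact List.mem_cons_of_mem _ (h4 j (by omega) (fun k hk1 hk2 => hall k hk1 hk2))
  · intro j hj hnot
    have hji : j ≠ i := fun e => hnot (by simp [e])
    exact h5 j (by omega) (fun hm => hnot (List.mem_cons_of_mem _ hm))

theorem mainLoopB_spec (P : List Int) :
    ∀ (m i : Nat) (st : List Nat) (ans : List Int), i + m = P.length → BInv P i st ans →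
      BInv P P.length (mainLoopB P m i st ans).1 (mainLoopB P m i st ans).2 := by
  intro m
  induction m with
  | zero =>
      intro i st ans he h
      have hin : i = P.length := by omega
      subst hin
      simpa only [mainLoopB] using h
  | succ m ih =>
      intro i st ans he h
      have hi : i < P.length := by omega
      obtain ⟨hm, hle⟩ := popDrop_spec P i hi st ans (BInv_toM P i st ans h)
      exact ih (i + 1) _ _ (by omega) (push_spec P i hi _ _ hm hle)

theorem finLoopB_length (n : Nat) (st : List Nat) (ans : List Int) :
    (finLoopB n st ans).length = ans.length := by
  induction st generalizing ans with
  | nil => rfl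
  | cons j st ih => simp [finLoopB, ih]

theorem finLoopB_getD (n : Nat) (st : List Nat) (ans : List Int) (j : Nat)
    (hj : j < ans.length) :
    (finLoopB n st ans).getD j 0 =
      if j ∈ st then (n : Int) - 1 - (j : Int) else ans.getD j 0 := by
  induction st generalizing ans with
  | nil => simp [finLoopB]
  | cons j' st ih =>
      simp only [finLoopB]
      rw [ih _ (by simpa using hj)]
      by_cases hmem : j ∈ st
      · simp [hmem]
      · by_cases hjj : j = j'
        · subst hjj
          rw [List.getD_eq_getElem _ _ (by simpa using hj)]
          simp [hmem]
        · simp only [hmem, if_false, List.mem_cons, hjj, false_or]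
          rw [List.getD_eq_getElem _ _ (by simpa using hj),
              List.getElem_set_ne (fun e => hjj e.symm), ← List.getD_eq_getElem _ _ hj]

theorem solution_alt_getD (P : List Int) (j : Nat) (hj : j < P.length) :
    (solution_alt P).getD j 0 = durTail (P.getD j 0) (P.drop (j + 1)) := by
  have hinv0 : BInv P 0 [] (List.replicate P.length 0) := by
    refine ⟨by simp, by simp, by simp, by omega, by omega⟩
  have hfin := mainLoopB_spec P P.length 0 [] (List.replicate P.length 0) (by omega) hinv0
  set r := mainLoopB P P.length 0 [] (List.replicate P.length 0) with hr
  obtain ⟨h1, _h2, h3, _h4, h5⟩ := hfin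
  show (finLoopB P.length r.1 r.2).getD j 0 = _
  rw [finLoopB_getD P.length r.1 r.2 j (by omega)]
  by_cases hmem : j ∈ r.1
  · have hnd := (h3 j hmem).2
    have : durTail (P.getD j 0) (P.drop (j + 1)) = ((P.drop (j + 1)).length : Int) :=
      durTail_all _ _ (fun k hk => by
        simp only [List.length_drop] at hk
        rw [getD_drop P (j + 1) k (by omega)]
        exact hnd (j + 1 + k) (by omega) (by omega))
    rw [if_pos hmem, this]
    simp; omega
  · rw [if_neg hmem]
    exact h5 j hj hmem

theorem solution_alt_length (P : List Int) : (solution_alt P).length = P.length := by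
  have hinv0 : BInv P 0 [] (List.replicate P.length 0) := by
    refine ⟨by simp, by simp, by simp, by omega, by omega⟩
  have hfin := mainLoopB_spec P P.length 0 [] (List.replicate P.length 0) (by omega) hinv0
  show (finLoopB P.length _ _).length = P.length
  rw [finLoopB_length]
  exact hfin.1

-- ===== VERDICT (by name: the statement is the Claim_ definition above) =====
theorem solution_spec : Claim_equal_solution := by
  unfold Claim_equal_solution Spec_solution
  intro prices _
  rw [solution_eq_whileA]
  apply List.ext_getElem (by rw [whileA_length, solution_alt_length])
  intro j hj hj'
  have hjP : j < prices.length := by rwa [whileA_length] at hj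
  rw [← List.getD_eq_getElem _ 0 hj, ← List.getD_eq_getElem _ 0 hj',
      whileA_getD prices j hjP, solution_alt_getD prices j hjP]
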